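-- pv_equiv track=rewrite | github.com/Oscar-AVS/OFERTA-OFERTA- | OFERTA-OFERTA.py | calcular_oferta_2x1
-- ===== SOURCE A (Python) =====
-- def calcular_oferta_2x1(cantidad, precio_unitario):
--     total = 0
--     ahorro = 0
--     for i in range(0, cantidad, 2):
--         if i + 1 < cantidad:
--             total += precio_unitario
--             ahorro += precio_unitario
--         else:
--             total += precio_unitario
--     return total, ahorro
-- ===== SOURCE B (Python) =====
-- def calcular_oferta_2x1(cantidad, precio_unitario):
--     n = max(cantidad, 0)
--     return (n + 1) // 2 * precio_unitario, n // 2 * precio_unitario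
-- ===== Notes on version B (the rewrite author's own statement) =====
-- stated objective: faster
-- what changed: Replaces the step-2 loop accumulating total and savings with closed-form arithmetic: total = ceil(n/2)*price and savings = (n//2)*price with n = max(cantidad, 0).
import Mathlib
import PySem

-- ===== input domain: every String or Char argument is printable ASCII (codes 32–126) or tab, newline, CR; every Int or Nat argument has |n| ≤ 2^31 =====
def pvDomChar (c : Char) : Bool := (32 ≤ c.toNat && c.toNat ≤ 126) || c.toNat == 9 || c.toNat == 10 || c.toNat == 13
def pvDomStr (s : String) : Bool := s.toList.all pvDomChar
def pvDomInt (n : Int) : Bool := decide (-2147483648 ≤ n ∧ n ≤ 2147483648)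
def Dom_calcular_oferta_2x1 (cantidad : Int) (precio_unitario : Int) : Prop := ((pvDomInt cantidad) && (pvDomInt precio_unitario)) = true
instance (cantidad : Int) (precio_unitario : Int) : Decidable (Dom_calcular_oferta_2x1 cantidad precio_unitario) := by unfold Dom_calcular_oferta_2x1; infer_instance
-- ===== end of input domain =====

-- B replaces A's step-2 accumulation loop with closed-form arithmetic (objective: faster).

-- ===== PORT A =====
-- for i in range(0, cantidad, 2): accumulate (total, ahorro)
def calcular_oferta_2x1 (cantidad : Int) (precio_unitario : Int) : List Int :=
  let st := (PySem.List.pyRange 0 cantidad 2).foldl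
    (fun (s : Int × Int) i =>
      if i + 1 < cantidad then (s.1 + precio_unitario, s.2 + precio_unitario)
      else (s.1 + precio_unitario, s.2))
    (0, 0)
  [st.1, st.2]

-- ===== PORT B =====
def calcular_oferta_2x1_alt (cantidad : Int) (precio_unitario : Int) : List Int :=
  let n := max cantidad 0
  [PySem.Int.floordiv (n + 1) 2 * precio_unitario, PySem.Int.floordiv n 2 * precio_unitario]

-- ===== PRECONDITION & SPEC =====
def Spec_calcular_oferta_2x1 (cantidad : Int) (precio_unitario : Int) (out : List Int) : Prop := out = calcular_oferta_2x1_alt cantidad precio_unitario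
instance (cantidad : Int) (precio_unitario : Int) (out : List Int) : Decidable (Spec_calcular_oferta_2x1 cantidad precio_unitario out) := by unfold Spec_calcular_oferta_2x1; infer_instance

-- ===== CLAIM (what is proved, stated in full; the proofs are below) =====
def Claim_equal_calcular_oferta_2x1 : Prop := ∀ (cantidad : Int) (precio_unitario : Int), Dom_calcular_oferta_2x1 cantidad precio_unitario → Spec_calcular_oferta_2x1 cantidad precio_unitario (calcular_oferta_2x1 cantidad precio_unitario)

-- ===== LEMMAS AND PROOFS =====

-- evaluates A's loop over the first n even indices
theorem pv_fold_eval (c p : Int) (n : Nat) (t a : Int) :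
    ((List.range n).map (fun (k : Nat) => (0:Int) + 2 * (k : Int))).foldl
      (fun (s : Int × Int) i =>
        if i + 1 < c then (s.1 + p, s.2 + p) else (s.1 + p, s.2))
      (t, a)
    = (t + n * p, a + (min n (c / 2).toNat) * p) := by
  induction n generalizing t a with
  | zero => simp
  | succ m ih =>
      rw [List.range_succ, List.map_append, List.foldl_append, ih]
      simp only [List.map_cons, List.map_nil, List.foldl_cons, List.foldl_nil]
      by_cases h : (0:Int) + 2 * (m : Int) + 1 < c
      · rw [if_pos h]
        have hmin : (min (m + 1) (c / 2).toNat : Int) = (min m (c / 2).toNat : Int) + 1 := by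
          omega
        push_cast
        push_cast at hmin
        rw [hmin]; ring_nf
      · rw [if_neg h]
        have hmin : (min (m + 1) (c / 2).toNat : Int) = (min m (c / 2).toNat : Int) := by
          omega
        push_cast
        push_cast at hmin
        rw [hmin]; ring_nf

-- ===== VERDICT (by name: the statement is the Claim_ definition above) =====
theorem calcular_oferta_2x1_spec : Claim_equal_calcular_oferta_2x1 := by
  intro c p _
  show calcular_oferta_2x1 c p = calcular_oferta_2x1_alt c p
  unfold calcular_oferta_2x1 calcular_oferta_2x1_alt
  dsimp only
  rw [PySem.List.pyRange_of_pos 0 c (by norm_num)]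
  by_cases hc : (0:Int) < c
  · rw [if_pos hc, pv_fold_eval]
    simp only [PySem.Int.floordiv]
    have hf1 : (max c 0 + 1).fdiv 2 = (max c 0 + 1) / 2 := by
      rw [Int.fdiv_eq_ediv]; simp
    have hf2 : (max c 0).fdiv 2 = max c 0 / 2 := by
      rw [Int.fdiv_eq_ediv]; simp
    rw [hf1, hf2]
    have h1 : (((c - 0 + 2 - 1) / 2).toNat : Int) = (max c 0 + 1) / 2 := by omega
    have h2 : ((min ((c - 0 + 2 - 1) / 2).toNat (c / 2).toNat : Nat) : Int) = max c 0 / 2 := by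
      omega
    rw [h1, h2]
    simp
  · rw [if_neg hc]
    have hmax : max c 0 = 0 := by omega
    simp [hmax, PySem.Int.floordiv]
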